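-- pv_equiv track=rewrite | github.com/wazuh/wazuh | tools/policy-migration/refactor_regex.py | _has_literal_quants_in_rn_tokens
-- ===== SOURCE A (Python) =====
-- from typing import List, Tuple, Set, Optional
--
-- _QUANTIFIER_PREV_ALLOWED = set(['w', 'd', 's', 't', 'p', 'W', 'D', 'S', '.'])
--
-- def _has_literal_quants_in_payload(payload: str, quote_char: Optional[str]) -> bool:
--     i = 0
--     n = len(payload)
--     def prev_token_allows_quantifier(idx: int) -> bool:
--         if idx <= 0:
--             return False
--         if quote_char == '"':
--             if idx - 3 >= 0 and payload[idx - 3] == '\\' and payload[idx - 2] == '\\' and payload[idx - 1] in _QUANTIFIER_PREV_ALLOWED: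
--                 return True
--         else:
--             if idx - 2 >= 0 and payload[idx - 2] == '\\' and payload[idx - 1] in _QUANTIFIER_PREV_ALLOWED:
--                 return True
--         return False
--     while i < n:
--         if payload[i] in ('*', '+') and not prev_token_allows_quantifier(i):
--             return True
--         i += 1
--     return False
--
-- def _has_literal_quants_in_rn_tokens(text: str, quote_char: Optional[str]) -> bool:
--     i = 0
--     s = text
--     n = len(s)
--     def read_until_boundary(k: int) -> Tuple[str, int]:
--         j = k
--         while j < n and not (s.startswith(' && ', j) or s.startswith(' compare ', j)):
--             j += 1
--         return s[k:j], j
--     while i < n: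
--         if i + 2 < n and s[i] == '!' and s[i + 1] in ('r', 'n') and s[i + 2] == ':':
--             i += 3
--             payload, i = read_until_boundary(i)
--             if _has_literal_quants_in_payload(payload, quote_char):
--                 return True
--             continue
--         if i + 1 < n and s[i] in ('r', 'n') and s[i + 1] == ':':
--             i += 2
--             payload, i = read_until_boundary(i)
--             if _has_literal_quants_in_payload(payload, quote_char):
--                 return True
--             continue
--         i += 1
--     return False
-- ===== SOURCE B (Python) =====
-- # B: split-on-delimiters decomposition — split text into fields on the first-coming
-- # boundary (' && ' / ' compare '), then in each field take the payload after the
-- # leftmost token prefix (!r:/!n:/r:/n:) and reuse the unchanged payload check.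
-- from typing import List, Tuple, Set, Optional
--
-- _QUANTIFIER_PREV_ALLOWED = set(['w', 'd', 's', 't', 'p', 'W', 'D', 'S', '.'])
--
-- def _has_literal_quants_in_payload(payload: str, quote_char: Optional[str]) -> bool:
--     i = 0
--     n = len(payload)
--     def prev_token_allows_quantifier(idx: int) -> bool:
--         if idx <= 0:
--             return False
--         if quote_char == '"':
--             if idx - 3 >= 0 and payload[idx - 3] == '\\' and payload[idx - 2] == '\\' and payload[idx - 1] in _QUANTIFIER_PREV_ALLOWED:
--                 return True
--         else:
--             if idx - 2 >= 0 and payload[idx - 2] == '\\' and payload[idx - 1] in _QUANTIFIER_PREV_ALLOWED: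
--                 return True
--         return False
--     while i < n:
--         if payload[i] in ('*', '+') and not prev_token_allows_quantifier(i):
--             return True
--         i += 1
--     return False
--
-- def _split_fields(text: str) -> List[str]:
--     fields = []
--     rest = text
--     while True:
--         cands = []
--         for delim in (' && ', ' compare '):
--             p = rest.find(delim)
--             if p != -1:
--                 cands.append((p, len(delim)))
--         if not cands:
--             fields.append(rest)
--             return fields
--         p, d = min(cands)
--         fields.append(rest[:p])
--         rest = rest[p + d:]
--
-- def _first_payload(field: str) -> Optional[str]:
--     best = None
--     for tok in ('!r:', '!n:', 'r:', 'n:'):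
--         p = field.find(tok)
--         if p != -1 and (best is None or p < best[0]):
--             best = (p, p + len(tok))
--     if best is None:
--         return None
--     return field[best[1]:]
--
-- def _has_literal_quants_in_rn_tokens(text: str, quote_char: Optional[str]) -> bool:
--     for field in _split_fields(text):
--         payload = _first_payload(field)
--         if payload is not None and _has_literal_quants_in_payload(payload, quote_char):
--             return True
--     return False
-- ===== Notes on version B (the rewrite author's own statement) =====
-- stated objective: idiomatic
-- what changed: A's single char-by-char state machine interleaving token detection with boundary reading is replaced by a split-into-fields pass (first-coming ' && '/' compare ' delimiter) followed by a per-field find()-based search for the leftmost !r:/!n:/r:/n: token prefix, whose payload (rest of the field) is checked by the unchanged payload helper.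
import Mathlib
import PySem

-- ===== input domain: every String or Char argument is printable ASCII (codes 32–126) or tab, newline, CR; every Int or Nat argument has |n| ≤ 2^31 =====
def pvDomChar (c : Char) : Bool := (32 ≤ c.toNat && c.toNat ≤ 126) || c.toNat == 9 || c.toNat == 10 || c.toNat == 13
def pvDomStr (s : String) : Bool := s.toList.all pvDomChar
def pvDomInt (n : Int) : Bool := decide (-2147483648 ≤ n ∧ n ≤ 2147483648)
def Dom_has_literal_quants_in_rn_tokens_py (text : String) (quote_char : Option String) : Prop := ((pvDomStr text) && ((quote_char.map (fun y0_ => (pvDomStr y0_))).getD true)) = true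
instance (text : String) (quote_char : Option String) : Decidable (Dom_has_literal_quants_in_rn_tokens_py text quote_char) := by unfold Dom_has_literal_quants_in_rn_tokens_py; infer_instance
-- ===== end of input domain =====

-- B rewrites A's single char-by-char state machine as: split text into fields on the
-- first-coming ' && '/' compare ' delimiter, then per field take the payload after the
-- leftmost !r:/!n:/r:/n: token prefix (found with find) and reuse A's unchanged
-- payload check.  Objective: a more idiomatic decomposition (same asymptotic cost;
-- a timing run measured B faster via find()'s bulk substring search).

-- the two boundary delimiters
def pvD1 : List Char := [' ', '&', '&', ' ']
def pvD2 : List Char := [' ', 'c', 'o', 'm', 'p', 'a', 'r', 'e', ' ']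

-- ---- shared helper: _has_literal_quants_in_payload (Source B reuses it verbatim) ----
def pvPrevSet : List Char := ['w', 'd', 's', 't', 'p', 'W', 'D', 'S', '.']

-- prev_token_allows_quantifier(idx); idx is the loop index (a Nat, so 'idx <= 0' is 'idx = 0');
-- the getD defaults are never read: the guards 3 ≤ idx / 2 ≤ idx and idx < payload length keep all indices in range
def pvPrevAllows (quote_char : Option String) (payload : List Char) (idx : Nat) : Bool :=
  if idx = 0 then false
  else if quote_char = some "\"" then
    decide (3 ≤ idx) && (payload.getD (idx - 3) ' ' = '\\') && (payload.getD (idx - 2) ' ' = '\\')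
      && (payload.getD (idx - 1) ' ' ∈ pvPrevSet)
  else
    decide (2 ≤ idx) && (payload.getD (idx - 2) ' ' = '\\') && (payload.getD (idx - 1) ' ' ∈ pvPrevSet)

-- the 'while i < n' scan of _has_literal_quants_in_payload
def pvHasQAux (quote_char : Option String) (payload : List Char) (i : Nat) : Bool :=
  if h : i < payload.length then
    if (payload[i] = '*' || payload[i] = '+') && !(pvPrevAllows quote_char payload i) then true
    else pvHasQAux quote_char payload (i + 1)
  else false
termination_by payload.length - i

def pvHasQ (quote_char : Option String) (payload : List Char) : Bool :=
  pvHasQAux quote_char payload 0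

-- ===== PORT A =====
-- s.startswith(' && ', j) or s.startswith(' compare ', j), viewed on the suffix at j
def pvIsB (l : List Char) : Bool := PySem.Chars.startswith l pvD1 || PySem.Chars.startswith l pvD2

-- read_until_boundary: the payload part (s[k:j]) and the remaining suffix (at j)
def pvTakeUB : List Char → List Char
  | [] => []
  | c :: t => if pvIsB (c :: t) then [] else c :: pvTakeUB t

def pvDropUB : List Char → List Char
  | [] => []
  | c :: t => if pvIsB (c :: t) then c :: t else pvDropUB t

theorem pvDropUB_length_le (l : List Char) : (pvDropUB l).length ≤ l.length := by
  induction l with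
  | nil => simp [pvDropUB]
  | cons c t ih => by_cases h : pvIsB (c :: t) = true <;> simp [pvDropUB, h] <;> omega

-- 'i + 2 < n and s[i] == "!" and s[i+1] in ("r","n") and s[i+2] == ":"' on the suffix at i
def pvBangTok : List Char → Bool
  | a :: b :: c :: _ => a = '!' && (b = 'r' || b = 'n') && c = ':'
  | _ => false

-- 'i + 1 < n and s[i] in ("r","n") and s[i+1] == ":"' on the suffix at i
def pvTok : List Char → Bool
  | a :: b :: _ => (a = 'r' || a = 'n') && b = ':'
  | _ => false

-- the main while-loop of _has_literal_quants_in_rn_tokens, on the suffix at i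
def pvScanA (quote_char : Option String) : List Char → Bool
  | [] => false
  | c :: t =>
    if pvBangTok (c :: t) then
      (if pvHasQ quote_char (pvTakeUB ((c :: t).drop 3)) then true
       else pvScanA quote_char (pvDropUB ((c :: t).drop 3)))
    else if pvTok (c :: t) then
      (if pvHasQ quote_char (pvTakeUB ((c :: t).drop 2)) then true
       else pvScanA quote_char (pvDropUB ((c :: t).drop 2)))
    else pvScanA quote_char t
termination_by l => l.length
decreasing_by
  · have := pvDropUB_length_le ((c :: t).drop 3); simp at this ⊢; omega
  · have := pvDropUB_length_le ((c :: t).drop 2); simp at this ⊢; omega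
  · simp

def has_literal_quants_in_rn_tokens_py (text : String) (quote_char : Option String) : Bool :=
  pvScanA quote_char text.toList

-- ===== PORT B =====
theorem pvFind_len {l s : List Char} (h : ¬ PySem.Chars.find l s = -1) : s.length ≤ l.length :=
  List.IsInfix.length_le ((PySem.Chars.find_ne_neg_one_iff _ _).mp h)

-- _split_fields: cut at the earlier of rest.find(' && ') / rest.find(' compare ')
def pvSplitFields (l : List Char) : List (List Char) :=
  let p1 := PySem.Chars.find l pvD1
  let p2 := PySem.Chars.find l pvD2
  if h1 : p1 = -1 then
    if h2 : p2 = -1 then [l]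
    else l.take p2.toNat :: pvSplitFields (l.drop (p2.toNat + 9))
  else
    if h2 : p2 = -1 then l.take p1.toNat :: pvSplitFields (l.drop (p1.toNat + 4))
    else if p1 ≤ p2 then l.take p1.toNat :: pvSplitFields (l.drop (p1.toNat + 4))
    else l.take p2.toNat :: pvSplitFields (l.drop (p2.toNat + 9))
termination_by l.length
decreasing_by
  · have := pvFind_len h2; simp [pvD2] at this ⊢; omega
  · have := pvFind_len h1; simp [pvD1] at this ⊢; omega
  · have := pvFind_len h1; simp [pvD1] at this ⊢; omega
  · have := pvFind_len h2; simp [pvD2] at this ⊢; omega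

-- _first_payload's loop: best = leftmost of the four token finds, as (position, end)
def pvBestStep (f : List Char) (best : Option (Int × Int)) (tk : List Char) (len : Int) : Option (Int × Int) :=
  let p := PySem.Chars.find f tk
  match best with
  | none => if p = -1 then none else some (p, p + len)
  | some b => if p ≠ -1 ∧ p < b.1 then some (p, p + len) else some b

def pvBestTok (f : List Char) : Option (Int × Int) :=
  pvBestStep f (pvBestStep f (pvBestStep f (pvBestStep f none ['!', 'r', ':'] 3) ['!', 'n', ':'] 3) ['r', ':'] 2) ['n', ':'] 2

-- field[best[1]:]; best[1] = p + len(tok) ≥ 0, so the slice is a plain drop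
def pvFirstPayload? (f : List Char) : Option (List Char) :=
  match pvBestTok f with
  | none => none
  | some b => some (f.drop b.2.toNat)

def has_literal_quants_in_rn_tokens_py_alt (text : String) (quote_char : Option String) : Bool :=
  (pvSplitFields text.toList).any fun f =>
    match pvFirstPayload? f with
    | some payload => pvHasQ quote_char payload
    | none => false

-- ===== PRECONDITION & SPEC =====
def Spec_has_literal_quants_in_rn_tokens_py (text : String) (quote_char : Option String) (out : Bool) : Prop := out = has_literal_quants_in_rn_tokens_py_alt text quote_char
instance (text : String) (quote_char : Option String) (out : Bool) : Decidable (Spec_has_literal_quants_in_rn_tokens_py text quote_char out) := by unfold Spec_has_literal_quants_in_rn_tokens_py; infer_instance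

-- ===== CLAIM (what is proved, stated in full; the proofs are below) =====
def Claim_equal_has_literal_quants_in_rn_tokens_py : Prop := ∀ (text : String) (quote_char : Option String), Dom_has_literal_quants_in_rn_tokens_py text quote_char → Spec_has_literal_quants_in_rn_tokens_py text quote_char (has_literal_quants_in_rn_tokens_py text quote_char)

-- ===== LEMMAS AND PROOFS =====

-- proof-side leftmost-token scanner: the payload A extracts from a single (boundary-free) field
def pvFP (l : List Char) : Option (List Char) :=
  match l with
  | [] => none
  | _ :: t => if pvBangTok l then some (l.drop 3) else if pvTok l then some (l.drop 2) else pvFP t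

-- the per-field check B performs, and the one pvFP describes
def pvCheckB (quote_char : Option String) (f : List Char) : Bool :=
  match pvFirstPayload? f with
  | some payload => pvHasQ quote_char payload
  | none => false

-- ---- basic shape facts ----
theorem pvIsB_iff (l : List Char) : pvIsB l = true ↔ (pvD1 <+: l ∨ pvD2 <+: l) := by
  simp [pvIsB, PySem.Chars.startswith_iff]

theorem pvIsB_cons_ne (c : Char) (x : List Char) (h : c ≠ ' ') : pvIsB (c :: x) = false := by
  rw [Bool.eq_false_iff]
  intro hb
  rcases (pvIsB_iff _).mp hb with h1 | h1 <;>
    · rcases h1 with ⟨u, hu⟩; simp [pvD1, pvD2] at hu; exact h hu.1.symm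

theorem pvTakeUB_append_dropUB (l : List Char) : pvTakeUB l ++ pvDropUB l = l := by
  induction l with
  | nil => simp [pvTakeUB, pvDropUB]
  | cons c t ih => by_cases h : pvIsB (c :: t) = true <;> simp [pvTakeUB, pvDropUB, h, ih]

theorem pvTakeUB_prefix (l : List Char) : pvTakeUB l <+: l :=
  ⟨pvDropUB l, pvTakeUB_append_dropUB l⟩

theorem pvDropUB_nil_or_isB (l : List Char) : pvDropUB l = [] ∨ pvIsB (pvDropUB l) = true := by
  induction l with
  | nil => left; rfl
  | cons c t ih =>
    by_cases h : pvIsB (c :: t) = true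
    · right; simpa [pvDropUB, h]
    · simpa [pvDropUB, h] using ih

theorem pvBangTok_iff (l : List Char) : pvBangTok l = true ↔ (['!','r',':'] <+: l ∨ ['!','n',':'] <+: l) := by
  match l with
  | [] => simp [pvBangTok]
  | [a] => simp [pvBangTok]
  | [a, b] => simp [pvBangTok]
  | a :: b :: c :: r =>
    simp only [pvBangTok, List.cons_prefix_cons, List.nil_prefix, and_true]
    constructor
    · intro h
      simp at h
      obtain ⟨⟨h1, hb⟩, h3⟩ := h
      rcases hb with hb | hb <;> [left; right] <;> simp [h1, hb, h3]
    · rintro (⟨h1, h2, h3⟩ | ⟨h1, h2, h3⟩) <;> simp [← h1, ← h2, ← h3]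

theorem pvTok_iff (l : List Char) : pvTok l = true ↔ (['r',':'] <+: l ∨ ['n',':'] <+: l) := by
  match l with
  | [] => simp [pvTok]
  | [a] => simp [pvTok]
  | a :: b :: r =>
    simp only [pvTok, List.cons_prefix_cons, List.nil_prefix, and_true]
    constructor
    · intro h
      simp at h
      obtain ⟨ha, h2⟩ := h
      rcases ha with ha | ha <;> [left; right] <;> simp [ha, h2]
    · rintro (⟨h1, h2⟩ | ⟨h1, h2⟩) <;> simp [← h1, ← h2]

-- head-shape evaluation helpers for the token tests
theorem pvBangTok_head (a : Char) (x : List Char) (h : a ≠ '!') : pvBangTok (a :: x) = false := by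
  rcases x with _ | ⟨b, _ | ⟨c, r⟩⟩ <;> simp [pvBangTok, h]

theorem pvTok_head (a : Char) (x : List Char) (h1 : a ≠ 'r') (h2 : a ≠ 'n') : pvTok (a :: x) = false := by
  rcases x with _ | ⟨b, r⟩ <;> simp [pvTok, h1, h2]

theorem pvTok_snd (a b : Char) (x : List Char) (h : b ≠ ':') : pvTok (a :: b :: x) = false := by
  simp [pvTok, h]

theorem pvBangTok_mono (c : Char) (f t : List Char) (hp : f <+: t)
    (h : pvBangTok (c :: f) = true) : pvBangTok (c :: t) = true := by
  rcases (pvBangTok_iff _).mp h with h1 | h1 <;>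
    rw [List.cons_prefix_cons] at h1 <;>
    exact (pvBangTok_iff _).mpr (by
      first
      | exact Or.inl (List.cons_prefix_cons.mpr ⟨h1.1, h1.2.trans hp⟩)
      | exact Or.inr (List.cons_prefix_cons.mpr ⟨h1.1, h1.2.trans hp⟩))

theorem pvTok_mono (c : Char) (f t : List Char) (hp : f <+: t)
    (h : pvTok (c :: f) = true) : pvTok (c :: t) = true := by
  rcases (pvTok_iff _).mp h with h1 | h1 <;>
    rw [List.cons_prefix_cons] at h1 <;>
    exact (pvTok_iff _).mpr (by
      first
      | exact Or.inl (List.cons_prefix_cons.mpr ⟨h1.1, h1.2.trans hp⟩)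
      | exact Or.inr (List.cons_prefix_cons.mpr ⟨h1.1, h1.2.trans hp⟩))

-- one scan step over a char that starts no token
theorem pvScanA_step (quote_char : Option String) (c : Char) (t : List Char)
    (h1 : pvBangTok (c :: t) = false) (h2 : pvTok (c :: t) = false) :
    pvScanA quote_char (c :: t) = pvScanA quote_char t := by
  rw [pvScanA, h1, h2]; simp

-- scanning straight through a delimiter finds nothing
theorem pvSkipD1 (quote_char : Option String) (u : List Char) :
    pvScanA quote_char (pvD1 ++ u) = pvScanA quote_char u := by
  simp only [pvD1, List.cons_append, List.nil_append]
  rw [pvScanA_step _ _ _ (pvBangTok_head _ _ (by decide)) (pvTok_head _ _ (by decide) (by decide)),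
      pvScanA_step _ _ _ (pvBangTok_head _ _ (by decide)) (pvTok_head _ _ (by decide) (by decide)),
      pvScanA_step _ _ _ (pvBangTok_head _ _ (by decide)) (pvTok_head _ _ (by decide) (by decide)),
      pvScanA_step _ _ _ (pvBangTok_head _ _ (by decide)) (pvTok_head _ _ (by decide) (by decide))]

theorem pvSkipD2 (quote_char : Option String) (u : List Char) :
    pvScanA quote_char (pvD2 ++ u) = pvScanA quote_char u := by
  simp only [pvD2, List.cons_append, List.nil_append]
  rw [pvScanA_step _ _ _ (pvBangTok_head _ _ (by decide)) (pvTok_head _ _ (by decide) (by decide)),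
      pvScanA_step _ _ _ (pvBangTok_head _ _ (by decide)) (pvTok_head _ _ (by decide) (by decide)),
      pvScanA_step _ _ _ (pvBangTok_head _ _ (by decide)) (pvTok_head _ _ (by decide) (by decide)),
      pvScanA_step _ _ _ (pvBangTok_head _ _ (by decide)) (pvTok_head _ _ (by decide) (by decide)),
      pvScanA_step _ _ _ (pvBangTok_head _ _ (by decide)) (pvTok_head _ _ (by decide) (by decide)),
      pvScanA_step _ _ _ (pvBangTok_head _ _ (by decide)) (pvTok_head _ _ (by decide) (by decide)),
      pvScanA_step _ _ _ (pvBangTok_head _ _ (by decide)) (pvTok_snd _ _ _ (by decide)),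
      pvScanA_step _ _ _ (pvBangTok_head _ _ (by decide)) (pvTok_head _ _ (by decide) (by decide)),
      pvScanA_step _ _ _ (pvBangTok_head _ _ (by decide)) (pvTok_head _ _ (by decide) (by decide))]

-- ---- find characterisation ----
theorem pvInfix_of_prefix_drop {sub l : List Char} {i : Nat} (h : sub <+: l.drop i) : sub <:+: l :=
  List.infix_iff_prefix_suffix.mpr ⟨l.drop i, h, List.drop_suffix i l⟩

theorem pvFind_eq_of (l sub : List Char) (k : Nat) (h1 : sub <+: l.drop k)
    (h2 : ∀ i < k, ¬ sub <+: l.drop i) : PySem.Chars.find l sub = (k : Int) := by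
  have hnn : 0 ≤ PySem.Chars.find l sub :=
    (PySem.Chars.find_nonneg_iff _ _).mpr (pvInfix_of_prefix_drop h1)
  obtain ⟨hp, hmin⟩ := PySem.Chars.find_spec hnn
  have hkt : (PySem.Chars.find l sub).toNat = k := by
    rcases Nat.lt_trichotomy (PySem.Chars.find l sub).toNat k with h | h | h
    · exact absurd hp (h2 _ h)
    · exact h
    · exact absurd h1 (hmin _ h)
  omega

theorem pvFind_ne_zero (l sub : List Char) (h : ¬ sub <+: l) : PySem.Chars.find l sub ≠ 0 := by
  intro h0
  have hnn : 0 ≤ PySem.Chars.find l sub := by omega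
  obtain ⟨hp, -⟩ := PySem.Chars.find_spec hnn
  rw [h0] at hp
  exact h (by simpa using hp)

theorem pvFind_eq_zero (l sub : List Char) (h : sub <+: l) : PySem.Chars.find l sub = 0 :=
  pvFind_eq_of l sub 0 (by simpa using h) (by omega)

theorem pvNoPrefix_of_find_neg (l sub : List Char) (h : PySem.Chars.find l sub = -1) :
    ∀ i, ¬ sub <+: l.drop i := by
  intro i hp
  exact ((PySem.Chars.find_eq_neg_one_iff _ _).mp h) (pvInfix_of_prefix_drop hp)

theorem pvFind_cons (c : Char) (t sub : List Char) :
    PySem.Chars.find (c :: t) sub =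
      if sub <+: (c :: t) then 0
      else if PySem.Chars.find t sub = -1 then -1 else PySem.Chars.find t sub + 1 := by
  split
  · next h => exact pvFind_eq_zero _ _ h
  · next h =>
    split
    · next h1 =>
      rw [PySem.Chars.find_eq_neg_one_iff]
      intro hinf
      obtain ⟨j, hj⟩ := (PySem.Chars.exists_prefix_drop_iff_isIn sub (c :: t)).mpr
        ((PySem.Chars.isIn_iff_infix sub (c :: t)).mpr hinf)
      rcases j with _ | j
      · exact h (by simpa using hj)
      · exact pvNoPrefix_of_find_neg t sub h1 j (by simpa using hj)
    · next h1 =>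
      have hnn : 0 ≤ PySem.Chars.find t sub := by
        have := PySem.Chars.neg_one_le_find t sub; omega
      obtain ⟨hp, hmin⟩ := PySem.Chars.find_spec hnn
      have := pvFind_eq_of (c :: t) sub ((PySem.Chars.find t sub).toNat + 1)
        (by simpa using hp)
        (by
          intro i hi
          rcases i with _ | i
          · simpa using h
          · simpa using hmin i (by omega))
      omega

-- ---- takeUB/dropUB as take/drop at the first boundary ----
theorem pvUB_eq (k : Nat) : ∀ l : List Char, (∀ i < k, pvIsB (l.drop i) = false) →
    pvIsB (l.drop k) = true → pvTakeUB l = l.take k ∧ pvDropUB l = l.drop k := by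
  induction k with
  | zero =>
    intro l _ hk
    rcases l with _ | ⟨c, t⟩
    · simp at hk; exact absurd hk (by decide)
    · simp at hk; simp [pvTakeUB, pvDropUB, hk]
  | succ k ih =>
    intro l hlt hk
    have h0 : pvIsB l = false := by simpa using hlt 0 (Nat.succ_pos k)
    rcases l with _ | ⟨c, t⟩
    · simp at hk; exact absurd hk (by decide)
    · have := ih t (fun i hi => by simpa using hlt (i + 1) (by omega)) (by simpa using hk)
      simp [pvTakeUB, pvDropUB, h0, this.1, this.2]

theorem pvUB_none : ∀ l : List Char, (∀ i, pvIsB (l.drop i) = false) →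
    pvTakeUB l = l ∧ pvDropUB l = [] := by
  intro l
  induction l with
  | nil => intro _; simp [pvTakeUB, pvDropUB]
  | cons c t ih =>
    intro h
    have h0 : pvIsB (c :: t) = false := by simpa using h 0
    have := ih (fun i => by simpa using h (i + 1))
    simp [pvTakeUB, pvDropUB, h0, this.1, this.2]

theorem pvNoB (l : List Char) (k : Nat)
    (h1 : ∀ i < k, ¬ pvD1 <+: l.drop i) (h2 : ∀ i < k, ¬ pvD2 <+: l.drop i) :
    ∀ i < k, pvIsB (l.drop i) = false := by
  intro i hi
  rw [Bool.eq_false_iff]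
  intro hb
  rcases (pvIsB_iff _).mp hb with h | h
  · exact h1 i hi h
  · exact h2 i hi h

theorem pvD2_not_D1 (r : List Char) (h : pvD2 <+: r) : ¬ pvD1 <+: r := by
  obtain ⟨u, rfl⟩ := h
  intro h1
  obtain ⟨v, hv⟩ := h1
  simp [pvD1, pvD2] at hv

-- one unfolding of the splitter, in takeUB/dropUB terms
theorem pvSplit_step (l : List Char) :
    pvSplitFields l = pvTakeUB l ::
      (if pvD1 <+: pvDropUB l then pvSplitFields ((pvDropUB l).drop 4)
       else if pvD2 <+: pvDropUB l then pvSplitFields ((pvDropUB l).drop 9)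
       else []) := by
  rw [pvSplitFields]
  by_cases h1 : PySem.Chars.find l pvD1 = -1 <;> by_cases h2 : PySem.Chars.find l pvD2 = -1
  · -- no boundary at all
    have hub := pvUB_none l (fun i => by
      rw [Bool.eq_false_iff]
      intro hb
      rcases (pvIsB_iff _).mp hb with h | h
      · exact pvNoPrefix_of_find_neg l pvD1 h1 i h
      · exact pvNoPrefix_of_find_neg l pvD2 h2 i h)
    rw [dif_pos h1, dif_pos h2, hub.1, hub.2]
    simp [pvD1, pvD2]
  · -- only ' compare '
    have hnn : 0 ≤ PySem.Chars.find l pvD2 := by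
      have := PySem.Chars.neg_one_le_find l pvD2; omega
    obtain ⟨hp, hmin⟩ := PySem.Chars.find_spec hnn
    set k := (PySem.Chars.find l pvD2).toNat with hk
    have hub := pvUB_eq k l
      (pvNoB l k (fun i _ => pvNoPrefix_of_find_neg l pvD1 h1 i) (fun i hi => hmin i hi))
      ((pvIsB_iff _).mpr (Or.inr hp))
    have hnd1 : ¬ pvD1 <+: l.drop k := fun hc => pvNoPrefix_of_find_neg l pvD1 h1 k hc
    rw [dif_pos h1, dif_neg h2, hub.1, hub.2, if_neg hnd1, if_pos hp, List.drop_drop]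
  · -- only ' && '
    have hnn : 0 ≤ PySem.Chars.find l pvD1 := by
      have := PySem.Chars.neg_one_le_find l pvD1; omega
    obtain ⟨hp, hmin⟩ := PySem.Chars.find_spec hnn
    set k := (PySem.Chars.find l pvD1).toNat with hk
    have hub := pvUB_eq k l
      (pvNoB l k (fun i hi => hmin i hi) (fun i _ => pvNoPrefix_of_find_neg l pvD2 h2 i))
      ((pvIsB_iff _).mpr (Or.inl hp))
    rw [dif_neg h1, dif_pos h2, hub.1, hub.2, if_pos hp, List.drop_drop]
  · -- both present: the earlier one wins
    have hnn1 : 0 ≤ PySem.Chars.find l pvD1 := by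
      have := PySem.Chars.neg_one_le_find l pvD1; omega
    have hnn2 : 0 ≤ PySem.Chars.find l pvD2 := by
      have := PySem.Chars.neg_one_le_find l pvD2; omega
    obtain ⟨hp1, hmin1⟩ := PySem.Chars.find_spec hnn1
    obtain ⟨hp2, hmin2⟩ := PySem.Chars.find_spec hnn2
    by_cases hle : PySem.Chars.find l pvD1 ≤ PySem.Chars.find l pvD2
    · set k := (PySem.Chars.find l pvD1).toNat with hk
      have hub := pvUB_eq k l
        (pvNoB l k (fun i hi => hmin1 i hi) (fun i hi => hmin2 i (by omega)))
        ((pvIsB_iff _).mpr (Or.inl hp1))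
      rw [dif_neg h1, dif_neg h2, if_pos hle, hub.1, hub.2, if_pos hp1, List.drop_drop]
    · set k := (PySem.Chars.find l pvD2).toNat with hk
      have hub := pvUB_eq k l
        (pvNoB l k (fun i hi => hmin1 i (by omega)) (fun i hi => hmin2 i hi))
        ((pvIsB_iff _).mpr (Or.inr hp2))
      have hnd1 : ¬ pvD1 <+: l.drop k := fun hc => hmin1 k (by omega) hc
      rw [dif_neg h1, dif_neg h2, if_neg hle, hub.1, hub.2, if_neg hnd1, if_pos hp2, List.drop_drop]

-- the check A effectively performs on one field
def pvCheckFP (quote_char : Option String) (f : List Char) : Bool :=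
  match pvFP f with
  | some p => pvHasQ quote_char p
  | none => false

-- A's scan processes exactly one leftmost token per boundary-free stretch
theorem pvField (quote_char : Option String) (l : List Char) :
    pvScanA quote_char l
      = (pvCheckFP quote_char (pvTakeUB l) || pvScanA quote_char (pvDropUB l)) := by
  induction l with
  | nil => simp [pvScanA, pvTakeUB, pvDropUB, pvCheckFP, pvFP]
  | cons c t ih =>
    by_cases hB : pvIsB (c :: t) = true
    · simp [pvTakeUB, pvDropUB, hB, pvCheckFP, pvFP]
    · by_cases hbang : pvBangTok (c :: t) = true
      · rcases (pvBangTok_iff _).mp hbang with h1 | h1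
        · obtain ⟨u, hu⟩ := h1
          obtain ⟨rfl, rfl⟩ : c = '!' ∧ t = 'r' :: ':' :: u := by simpa using hu.symm
          rw [pvScanA, hbang]
          have e1 : pvIsB ('!' :: 'r' :: ':' :: u) = false := pvIsB_cons_ne _ _ (by decide)
          have e2 : pvIsB ('r' :: ':' :: u) = false := pvIsB_cons_ne _ _ (by decide)
          have e3 : pvIsB (':' :: u) = false := pvIsB_cons_ne _ _ (by decide)
          simp only [pvTakeUB, pvDropUB, e1, e2, e3, Bool.false_eq_true, if_false, if_true,
            List.drop_succ_cons, List.drop_zero]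
          have hfp : pvFP ('!' :: 'r' :: ':' :: pvTakeUB u) = some (pvTakeUB u) := by
            rw [pvFP]
            simp [pvBangTok]
          simp only [pvCheckFP, hfp]
          cases hq : pvHasQ quote_char (pvTakeUB u) <;> simp [hq]
        · obtain ⟨u, hu⟩ := h1
          obtain ⟨rfl, rfl⟩ : c = '!' ∧ t = 'n' :: ':' :: u := by simpa using hu.symm
          rw [pvScanA, hbang]
          have e1 : pvIsB ('!' :: 'n' :: ':' :: u) = false := pvIsB_cons_ne _ _ (by decide)
          have e2 : pvIsB ('n' :: ':' :: u) = false := pvIsB_cons_ne _ _ (by decide)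
          have e3 : pvIsB (':' :: u) = false := pvIsB_cons_ne _ _ (by decide)
          simp only [pvTakeUB, pvDropUB, e1, e2, e3, Bool.false_eq_true, if_false, if_true,
            List.drop_succ_cons, List.drop_zero]
          have hfp : pvFP ('!' :: 'n' :: ':' :: pvTakeUB u) = some (pvTakeUB u) := by
            rw [pvFP]
            simp [pvBangTok]
          simp only [pvCheckFP, hfp]
          cases hq : pvHasQ quote_char (pvTakeUB u) <;> simp [hq]
      · by_cases htok : pvTok (c :: t) = true
        · rcases (pvTok_iff _).mp htok with h1 | h1
          · obtain ⟨u, hu⟩ := h1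
            obtain ⟨rfl, rfl⟩ : c = 'r' ∧ t = ':' :: u := by simpa using hu.symm
            rw [pvScanA]
            rw [show pvBangTok ('r' :: ':' :: u) = false from by simpa using hbang, htok]
            have e1 : pvIsB ('r' :: ':' :: u) = false := pvIsB_cons_ne _ _ (by decide)
            have e2 : pvIsB (':' :: u) = false := pvIsB_cons_ne _ _ (by decide)
            simp only [pvTakeUB, pvDropUB, e1, e2, Bool.false_eq_true, if_false, if_true,
              List.drop_succ_cons, List.drop_zero]
            have hfp : pvFP ('r' :: ':' :: pvTakeUB u) = some (pvTakeUB u) := by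
              rw [pvFP]
              rw [pvBangTok_head _ _ (by decide)]
              simp [pvTok]
            simp only [pvCheckFP, hfp]
            cases hq : pvHasQ quote_char (pvTakeUB u) <;> simp [hq]
          · obtain ⟨u, hu⟩ := h1
            obtain ⟨rfl, rfl⟩ : c = 'n' ∧ t = ':' :: u := by simpa using hu.symm
            rw [pvScanA]
            rw [show pvBangTok ('n' :: ':' :: u) = false from by simpa using hbang, htok]
            have e1 : pvIsB ('n' :: ':' :: u) = false := pvIsB_cons_ne _ _ (by decide)
            have e2 : pvIsB (':' :: u) = false := pvIsB_cons_ne _ _ (by decide)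
            simp only [pvTakeUB, pvDropUB, e1, e2, Bool.false_eq_true, if_false, if_true,
              List.drop_succ_cons, List.drop_zero]
            have hfp : pvFP ('n' :: ':' :: pvTakeUB u) = some (pvTakeUB u) := by
              rw [pvFP]
              rw [pvBangTok_head _ _ (by decide)]
              simp [pvTok]
            simp only [pvCheckFP, hfp]
            cases hq : pvHasQ quote_char (pvTakeUB u) <;> simp [hq]
        · have hbang' : pvBangTok (c :: t) = false := by simpa using hbang
          have htok' : pvTok (c :: t) = false := by simpa using htok
          have hb2 : pvBangTok (c :: pvTakeUB t) = false := by
            rw [Bool.eq_false_iff]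
            intro hx
            exact absurd (pvBangTok_mono c _ t (pvTakeUB_prefix t) hx) (by simp [hbang'])
          have ht2 : pvTok (c :: pvTakeUB t) = false := by
            rw [Bool.eq_false_iff]
            intro hx
            exact absurd (pvTok_mono c _ t (pvTakeUB_prefix t) hx) (by simp [htok'])
          have hfp : pvFP (c :: pvTakeUB t) = pvFP (pvTakeUB t) := by
            rw [pvFP, hb2, ht2]
            simp
          rw [pvScanA_step _ _ _ hbang' htok']
          simp only [pvTakeUB, pvDropUB, hB, Bool.false_eq_true, if_false, pvCheckFP, hfp]
          exact ih

-- ---- the find()-based best-token loop equals the leftmost-scan pvFP ----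
theorem pvBestStep_shift (c : Char) (t : List Char) (best : Option (Int × Int))
    (tk : List Char) (len : Int) (hnp : ¬ tk <+: (c :: t)) :
    pvBestStep (c :: t) (best.map fun b => (b.1 + 1, b.2 + 1)) tk len
      = (pvBestStep t best tk len).map (fun b => (b.1 + 1, b.2 + 1)) := by
  have hc := pvFind_cons c t tk
  rw [if_neg hnp] at hc
  have hge := PySem.Chars.neg_one_le_find t tk
  by_cases hm : PySem.Chars.find t tk = -1
  · rw [if_pos hm] at hc
    cases best with
    | none => simp [pvBestStep, hc, hm]
    | some b => simp [pvBestStep, hc, hm]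
  · rw [if_neg hm] at hc
    cases best with
    | none =>
      simp only [pvBestStep, Option.map_none, hc, hm]
      simp [Prod.ext_iff]
      omega
    | some b =>
      simp only [pvBestStep, Option.map_some, hc]
      by_cases hlt : PySem.Chars.find t tk < b.1
      · rw [if_pos ⟨by omega, by omega⟩, if_pos ⟨hm, hlt⟩]
        simp only [Option.map_some]
        congr 1
        simp [Prod.ext_iff]
        omega
      · have c1 : ¬ (PySem.Chars.find t tk + 1 ≠ -1 ∧ PySem.Chars.find t tk + 1 < b.1 + 1) := by
          omega
        have c2 : ¬ (PySem.Chars.find t tk ≠ -1 ∧ PySem.Chars.find t tk < b.1) := by omega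
        rw [if_neg c1, if_neg c2]
        simp

theorem pvBestStep_pos (f : List Char) (best : Option (Int × Int)) (tk : List Char) (len : Int)
    (hb : ∀ b, best = some b → 1 ≤ b.1) (hq : PySem.Chars.find f tk ≠ 0) :
    ∀ b, pvBestStep f best tk len = some b → 1 ≤ b.1 := by
  intro b hstep
  have hge := PySem.Chars.neg_one_le_find f tk
  cases best with
  | none =>
    simp only [pvBestStep] at hstep
    split at hstep
    · cases hstep
    · next h => cases hstep; simp; omega
  | some b0 =>
    simp only [pvBestStep] at hstep
    split at hstep
    · next h => cases hstep; simp; omega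
    · cases hstep; exact hb _ rfl

theorem pvBestStep_zero (f : List Char) (best : Option (Int × Int)) (tk : List Char) (len : Int)
    (hb : ∀ b, best = some b → 1 ≤ b.1) (hq : PySem.Chars.find f tk = 0) :
    pvBestStep f best tk len = some (0, len) := by
  cases best with
  | none => simp [pvBestStep, hq]
  | some b0 =>
    have h1 := hb b0 rfl
    simp only [pvBestStep, hq]
    rw [if_pos ⟨by omega, by omega⟩]
    simp

theorem pvBestStep_keep (f : List Char) (tk : List Char) (len e : Int) :
    pvBestStep f (some (0, e)) tk len = some (0, e) := by
  have hge := PySem.Chars.neg_one_le_find f tk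
  simp only [pvBestStep]
  rw [if_neg (by simp; omega)]

theorem pvBestStep_snd (f : List Char) (best : Option (Int × Int)) (tk : List Char) (len : Int)
    (hlen : 0 ≤ len) (h : ∀ b, best = some b → 0 ≤ b.2) :
    ∀ b, pvBestStep f best tk len = some b → 0 ≤ b.2 := by
  intro b hstep
  have hge := PySem.Chars.neg_one_le_find f tk
  cases best with
  | none =>
    simp only [pvBestStep] at hstep
    split at hstep
    · cases hstep
    · next hcond => cases hstep; simp; omega
  | some b0 =>
    simp only [pvBestStep] at hstep
    split at hstep
    · next hcond => cases hstep; simp; omega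
    · cases hstep; exact h _ rfl

theorem pvBestTok_snd (f : List Char) : ∀ b, pvBestTok f = some b → 0 ≤ b.2 := by
  unfold pvBestTok
  exact pvBestStep_snd _ _ _ _ (by omega)
    (pvBestStep_snd _ _ _ _ (by omega)
      (pvBestStep_snd _ _ _ _ (by omega)
        (pvBestStep_snd _ _ _ _ (by omega) (fun b h => by cases h))))

theorem pvBestTok_shift (c : Char) (t : List Char)
    (h1 : ¬ ['!', 'r', ':'] <+: (c :: t)) (h2 : ¬ ['!', 'n', ':'] <+: (c :: t))
    (h3 : ¬ ['r', ':'] <+: (c :: t)) (h4 : ¬ ['n', ':'] <+: (c :: t)) :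
    pvBestTok (c :: t) = (pvBestTok t).map (fun b => (b.1 + 1, b.2 + 1)) := by
  unfold pvBestTok
  conv_lhs => rw [show (none : Option (Int × Int))
    = Option.map (fun b : Int × Int => (b.1 + 1, b.2 + 1)) none from rfl]
  rw [pvBestStep_shift c t none ['!', 'r', ':'] 3 h1,
      pvBestStep_shift c t _ ['!', 'n', ':'] 3 h2,
      pvBestStep_shift c t _ ['r', ':'] 2 h3,
      pvBestStep_shift c t _ ['n', ':'] 2 h4]

theorem pvFirstPayload_cons (c : Char) (t : List Char)
    (hbang : pvBangTok (c :: t) = false) (htok : pvTok (c :: t) = false) :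
    pvFirstPayload? (c :: t) = pvFirstPayload? t := by
  have h1 : ¬ ['!', 'r', ':'] <+: (c :: t) := fun h => by
    rw [(pvBangTok_iff _).mpr (Or.inl h)] at hbang; cases hbang
  have h2 : ¬ ['!', 'n', ':'] <+: (c :: t) := fun h => by
    rw [(pvBangTok_iff _).mpr (Or.inr h)] at hbang; cases hbang
  have h3 : ¬ ['r', ':'] <+: (c :: t) := fun h => by
    rw [(pvTok_iff _).mpr (Or.inl h)] at htok; cases htok
  have h4 : ¬ ['n', ':'] <+: (c :: t) := fun h => by
    rw [(pvTok_iff _).mpr (Or.inr h)] at htok; cases htok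
  simp only [pvFirstPayload?, pvBestTok_shift c t h1 h2 h3 h4]
  cases hb : pvBestTok t with
  | none => simp
  | some b =>
    have hsnd := pvBestTok_snd t b hb
    have ht : (b.2 + 1).toNat = b.2.toNat + 1 := by omega
    simp [ht]

theorem pvFirstPayload_tok3 (l : List Char) (hbang : pvBangTok l = true) :
    pvFirstPayload? l = some (l.drop 3) := by
  rcases (pvBangTok_iff _).mp hbang with h | h
  · obtain ⟨u, rfl⟩ := h
    have e1 : PySem.Chars.find (['!', 'r', ':'] ++ u) ['!', 'r', ':'] = 0 :=
      pvFind_eq_zero _ _ (List.prefix_append _ _)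
    unfold pvFirstPayload? pvBestTok
    rw [pvBestStep_zero _ _ _ _ (fun b h => by cases h) e1,
        pvBestStep_keep, pvBestStep_keep, pvBestStep_keep]
    simp
  · obtain ⟨u, rfl⟩ := h
    have e2 : PySem.Chars.find (['!', 'n', ':'] ++ u) ['!', 'n', ':'] = 0 :=
      pvFind_eq_zero _ _ (List.prefix_append _ _)
    have n1 : PySem.Chars.find (['!', 'n', ':'] ++ u) ['!', 'r', ':'] ≠ 0 :=
      pvFind_ne_zero _ _ (by simp [List.cons_prefix_cons])
    unfold pvFirstPayload? pvBestTok
    rw [pvBestStep_zero _ _ _ _ (pvBestStep_pos _ _ _ _ (fun b h => by cases h) n1) e2,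
        pvBestStep_keep, pvBestStep_keep]
    simp

theorem pvFirstPayload_tok2 (l : List Char) (hbang : pvBangTok l = false) (htok : pvTok l = true) :
    pvFirstPayload? l = some (l.drop 2) := by
  have hn1 : ¬ ['!', 'r', ':'] <+: l := fun h => by
    rw [(pvBangTok_iff _).mpr (Or.inl h)] at hbang; cases hbang
  have hn2 : ¬ ['!', 'n', ':'] <+: l := fun h => by
    rw [(pvBangTok_iff _).mpr (Or.inr h)] at hbang; cases hbang
  have n1 := pvFind_ne_zero _ _ hn1
  have n2 := pvFind_ne_zero _ _ hn2
  rcases (pvTok_iff _).mp htok with h | h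
  · obtain ⟨u, rfl⟩ := h
    have e3 : PySem.Chars.find (['r', ':'] ++ u) ['r', ':'] = 0 :=
      pvFind_eq_zero _ _ (List.prefix_append _ _)
    unfold pvFirstPayload? pvBestTok
    rw [pvBestStep_zero _ _ _ _
        (pvBestStep_pos _ _ _ _ (pvBestStep_pos _ _ _ _ (fun b h => by cases h) n1) n2) e3,
        pvBestStep_keep]
    simp
  · obtain ⟨u, rfl⟩ := h
    have e4 : PySem.Chars.find (['n', ':'] ++ u) ['n', ':'] = 0 :=
      pvFind_eq_zero _ _ (List.prefix_append _ _)
    have n3 : PySem.Chars.find (['n', ':'] ++ u) ['r', ':'] ≠ 0 :=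
      pvFind_ne_zero _ _ (by simp [List.cons_prefix_cons])
    unfold pvFirstPayload? pvBestTok
    rw [pvBestStep_zero _ _ _ _
        (pvBestStep_pos _ _ _ _
          (pvBestStep_pos _ _ _ _ (pvBestStep_pos _ _ _ _ (fun b h => by cases h) n1) n2) n3) e4]
    simp

theorem pvFP_eq (f : List Char) : pvFirstPayload? f = pvFP f := by
  induction f with
  | nil => rfl
  | cons c t ih =>
    by_cases hbang : pvBangTok (c :: t) = true
    · rw [pvFirstPayload_tok3 _ hbang, pvFP, hbang]
      simp
    · have hbang' : pvBangTok (c :: t) = false := by simpa using hbang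
      by_cases htok : pvTok (c :: t) = true
      · rw [pvFirstPayload_tok2 _ hbang' htok, pvFP, hbang', htok]
        simp
      · have htok' : pvTok (c :: t) = false := by simpa using htok
        rw [pvFirstPayload_cons c t hbang' htok', pvFP, hbang', htok']
        simp [ih]

theorem pvCheckB_eq (quote_char : Option String) (f : List Char) :
    pvCheckB quote_char f = pvCheckFP quote_char f := by
  simp only [pvCheckB, pvCheckFP, pvFP_eq]

-- ---- main equivalence, by strong induction on the length ----
theorem pv_main_aux (quote_char : Option String) (n : Nat) :
    ∀ l : List Char, l.length ≤ n →
      pvScanA quote_char l = (pvSplitFields l).any (pvCheckB quote_char) := by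
  induction n with
  | zero =>
    intro l hl
    obtain rfl : l = [] := List.eq_nil_of_length_eq_zero (Nat.le_zero.mp hl)
    have h0 : pvFirstPayload? [] = none := rfl
    simp [pvScanA, pvSplit_step, pvTakeUB, pvDropUB, pvD1, pvD2, pvCheckB, h0]
  | succ n ih =>
    intro l hl
    rw [pvField, pvSplit_step, List.any_cons, pvCheckB_eq]
    have hlen := pvDropUB_length_le l
    rcases pvDropUB_nil_or_isB l with hnil | hB
    · rw [hnil]
      simp [pvScanA, pvD1, pvD2]
    · rcases (pvIsB_iff _).mp hB with hd | hd
      · obtain ⟨u, hu⟩ := hd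
        have hul := congrArg List.length hu
        simp [pvD1] at hul
        have hpre : pvD1 <+: pvDropUB l := ⟨u, hu⟩
        rw [if_pos hpre, ← hu, pvSkipD1,
          show (pvD1 ++ u).drop 4 = u from by simp [pvD1]]
        rw [ih u (by omega)]
      · obtain ⟨u, hu⟩ := hd
        have hul := congrArg List.length hu
        simp [pvD2] at hul
        have hpre : pvD2 <+: pvDropUB l := ⟨u, hu⟩
        rw [if_neg (pvD2_not_D1 _ hpre), if_pos hpre, ← hu, pvSkipD2,
          show (pvD2 ++ u).drop 9 = u from by simp [pvD2]]
        rw [ih u (by omega)]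

theorem pv_main (quote_char : Option String) (l : List Char) :
    pvScanA quote_char l
      = (pvSplitFields l).any (fun f => pvCheckB quote_char f) := by
  simpa using pv_main_aux quote_char l.length l le_rfl

-- ===== VERDICT (by name: the statement is the Claim_ definition above) =====
theorem has_literal_quants_in_rn_tokens_py_spec : Claim_equal_has_literal_quants_in_rn_tokens_py := by
  intro text quote_char _
  show _ = _
  simpa [has_literal_quants_in_rn_tokens_py, has_literal_quants_in_rn_tokens_py_alt, pvCheckB]
    using pv_main quote_char text.toList
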